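-- pv_equiv track=rewrite | github.com/inbn6619/algorithm | 코딩테스트 고득점/힙/더 맵게.py | solution
-- ===== SOURCE A (Python) =====
-- def solution(scoville, K):
--     import heapq as hp
--
--     hp.heapify(scoville)
--     answer = 0
--     now = scoville[0]
--
--     while now < K and len(scoville) > 1:
--         first = hp.heappop(scoville)
--         second = hp.heappop(scoville)
--         new = first + second * 2
--         hp.heappush(scoville, new)
--         now = scoville[0]
--         answer += 1
--
--     if min(scoville) < K:
--         answer = - 1
--
--
--     return answer
-- ===== SOURCE B (Python) =====
-- def solution(scoville, K):
--     # Works on a sorted copy instead of heapifying the caller's list in place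
--     # (return value identical; A mutates scoville, B does not).
--     xs = sorted(scoville)
--     answer = 0
--     while xs[0] < K and len(xs) > 1:
--         new = xs[0] + xs[1] * 2
--         xs = xs[2:]
--         i = 0
--         while i < len(xs) and xs[i] < new:
--             i += 1
--         xs.insert(i, new)
--         answer += 1
--     return -1 if xs[0] < K else answer
-- ===== Notes on version B (the rewrite author's own statement) =====
-- stated objective: alternative
-- what changed: B replaces the binary heap with a once-sorted list kept sorted: the two smallest are the first two elements and the combined value is re-inserted by a linear ordered insert; B works on a sorted copy and does not mutate the caller's list (return value identical).
import Mathlib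
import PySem

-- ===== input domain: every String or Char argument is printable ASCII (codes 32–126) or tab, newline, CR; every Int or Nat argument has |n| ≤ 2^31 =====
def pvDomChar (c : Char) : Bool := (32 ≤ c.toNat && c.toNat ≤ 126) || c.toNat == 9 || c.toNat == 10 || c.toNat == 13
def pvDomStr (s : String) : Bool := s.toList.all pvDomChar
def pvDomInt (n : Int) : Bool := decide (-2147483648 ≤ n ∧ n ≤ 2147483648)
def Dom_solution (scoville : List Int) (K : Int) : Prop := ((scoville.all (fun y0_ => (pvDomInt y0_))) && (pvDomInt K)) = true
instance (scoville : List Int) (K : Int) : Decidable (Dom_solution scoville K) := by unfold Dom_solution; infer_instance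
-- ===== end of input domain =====

-- B drops the heap for a once-sorted list with ordered re-insertion (no mutation of the
-- caller's list; A heapifies/consumes scoville in place — the equivalence is about the
-- return value only).

-- ===== PORT A =====
-- heapq is modelled by the heap's multiset: heappop removes the first occurrence of the
-- minimum and scoville[0]/min() read the minimum — exact for the returned value.
def pyHeapTop (h : List Int) : Int := (PySem.List.min? h (fun x => x)).getD 0
def pyHeapPop (h : List Int) : Int × List Int := (pyHeapTop h, h.erase (pyHeapTop h))

def solutionLoop (fuel : Nat) (heap : List Int) (K now answer : Int) : Int × List Int :=
  match fuel with
  | 0 => (answer, heap)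
  | fuel + 1 =>
    if now < K ∧ heap.length > 1 then
      let p1 := pyHeapPop heap
      let p2 := pyHeapPop p1.2
      let new := p1.1 + p2.1 * 2
      let h3 := p2.2 ++ [new]
      solutionLoop fuel h3 K (pyHeapTop h3) (answer + 1)
    else (answer, heap)

def solution (scoville : List Int) (K : Int) : Int :=
  let r := solutionLoop scoville.length scoville K (pyHeapTop scoville) 0
  if pyHeapTop r.2 < K then -1 else r.1

-- ===== PORT B =====
-- hand-written ordered insert of Source B (scan past smaller elements, insert)
def insertSorted (v : Int) : List Int → List Int
  | [] => [v]
  | x :: t => if x < v then x :: insertSorted v t else v :: x :: t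

def finishB (xs : List Int) (K answer : Int) : Int :=
  if xs.headD 0 < K then -1 else answer

def loopB (fuel : Nat) (xs : List Int) (K answer : Int) : Int :=
  match fuel, xs with
  | f + 1, x :: y :: rest =>
    if x < K then loopB f (insertSorted (x + y * 2) rest) K (answer + 1)
    else finishB (x :: y :: rest) K answer
  | _, xs => finishB xs K answer

def solution_alt (scoville : List Int) (K : Int) : Int :=
  loopB scoville.length (PySem.List.sorted scoville (fun x => x) false) K 0

-- ===== PRECONDITION & SPEC =====
-- A reads scoville[0] (and min(scoville)) and therefore raises IndexError on []; B raises there too.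
def Pre_solution (scoville : List Int) (K : Int) : Prop := scoville ≠ []
instance (scoville : List Int) (K : Int) : Decidable (Pre_solution scoville K) := by
  unfold Pre_solution; infer_instance
def pvWitness_solution : List Int × Int := ([1, 2, 3, 9, 10, 12], 7)

def Spec_solution (scoville : List Int) (K : Int) (out : Int) : Prop := out = solution_alt scoville K
instance (scoville : List Int) (K : Int) (out : Int) : Decidable (Spec_solution scoville K out) := by unfold Spec_solution; infer_instance

-- ===== CLAIM (what is proved, stated in full; the proofs are below) =====
def Claim_equal_solution : Prop := ∀ (scoville : List Int) (K : Int), Dom_solution scoville K → Pre_solution scoville K → Spec_solution scoville K (solution scoville K)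

-- ===== LEMMAS AND PROOFS =====

theorem top_eq {xs ys : List Int} {y : Int} {t : List Int}
    (hperm : xs.Perm ys) (hsort : ys.Pairwise (· ≤ ·)) (hys : ys = y :: t) :
    pyHeapTop xs = y := by
  subst hys
  have hne : xs ≠ [] := by
    intro h; subst h; exact (List.cons_ne_nil y t) hperm.symm.eq_nil
  obtain ⟨m, hm⟩ : ∃ m, PySem.List.min? xs (fun x => x) = some m := by
    cases hmin : PySem.List.min? xs (fun x => x) with
    | none => exact absurd ((PySem.List.min?_eq_none_iff xs (fun x => x)).mp hmin) hne
    | some m => exact ⟨m, rfl⟩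
  have hmem : m ∈ xs := PySem.List.min?_mem hm
  have hmin : ∀ z ∈ xs, m ≤ z := PySem.List.min?_isMin hm
  have hyx : y ∈ xs := hperm.mem_iff.mpr List.mem_cons_self
  have h1 : m ≤ y := hmin y hyx
  have h2 : y ≤ m := by
    have := hperm.mem_iff.mp hmem
    rcases List.mem_cons.mp this with h | h
    · omega
    · exact List.rel_of_pairwise_cons hsort h
  simp [pyHeapTop, hm]; omega

theorem finish_eq {xs ys : List Int} {y : Int} {t : List Int} (K answer : Int)
    (hperm : xs.Perm ys) (hsort : ys.Pairwise (· ≤ ·)) (hys : ys = y :: t) :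
    (if pyHeapTop xs < K then (-1 : Int) else answer) = finishB ys K answer := by
  rw [top_eq hperm hsort hys]; subst hys; simp [finishB]

theorem insertSorted_perm (v : Int) (l : List Int) : (insertSorted v l).Perm (v :: l) := by
  induction l with
  | nil => simp [insertSorted]
  | cons x t ih =>
    simp only [insertSorted]
    split
    · exact ((ih.cons x).trans (List.Perm.swap v x t)).symm.symm
    · exact List.Perm.refl _

theorem insertSorted_sorted (v : Int) {l : List Int} (h : l.Pairwise (· ≤ ·)) :
    (insertSorted v l).Pairwise (· ≤ ·) := by
  induction l with
  | nil => simp [insertSorted]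
  | cons x t ih =>
    simp only [insertSorted]
    rcases List.pairwise_cons.mp h with ⟨hx, ht⟩
    split
    · rename_i hlt
      refine List.pairwise_cons.mpr ⟨?_, ih ht⟩
      intro z hz
      rcases List.mem_cons.mp ((insertSorted_perm v t).mem_iff.mp hz) with hzx | hzt
      · omega
      · exact hx z hzt
    · rename_i hge
      refine List.pairwise_cons.mpr ⟨?_, h⟩
      intro z hz
      rcases List.mem_cons.mp hz with hzx | hzt
      · omega
      · have := hx z hzt; omega

theorem loop_agree (fuel : Nat) (xs ys : List Int) (K answer : Int)
    (hperm : xs.Perm ys) (hsort : ys.Pairwise (· ≤ ·)) (hne : ys ≠ []) :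
    (if pyHeapTop (solutionLoop fuel xs K (pyHeapTop xs) answer).2 < K then (-1 : Int)
     else (solutionLoop fuel xs K (pyHeapTop xs) answer).1) = loopB fuel ys K answer := by
  induction fuel generalizing xs ys answer with
  | zero =>
    obtain ⟨y, t, rfl⟩ := List.exists_cons_of_ne_nil hne
    simpa [solutionLoop, loopB] using finish_eq K answer hperm hsort rfl
  | succ fuel ih =>
    obtain ⟨y, t, rfl⟩ := List.exists_cons_of_ne_nil hne
    have htop : pyHeapTop xs = y := top_eq hperm hsort rfl
    cases t with
    | nil =>
      have hlen : xs.length = 1 := by simpa using hperm.length_eq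
      have : ¬ (pyHeapTop xs < K ∧ xs.length > 1) := by omega
      simpa [solutionLoop, this, loopB] using finish_eq K answer hperm hsort rfl
    | cons y2 rest =>
      by_cases hK : y < K
      · have hlen : xs.length > 1 := by
          have := hperm.length_eq; simp at this; omega
        have hcond : pyHeapTop xs < K ∧ xs.length > 1 := ⟨by omega, hlen⟩
        -- first pop
        have hperm1 : (xs.erase y).Perm (y2 :: rest) := by
          have := hperm.erase y; simpa using this
        have hsort1 : (y2 :: rest).Pairwise (· ≤ ·) := (List.pairwise_cons.mp hsort).2
        have htop1 : pyHeapTop (xs.erase y) = y2 := top_eq hperm1 hsort1 rfl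
        -- second pop
        have hperm2 : ((xs.erase y).erase y2).Perm rest := by
          have := hperm1.erase y2; simpa using this
        -- new state
        set new := y + y2 * 2 with hnew
        have hperm3 : (((xs.erase y).erase y2) ++ [new]).Perm (insertSorted new rest) :=
          (List.perm_append_singleton new _).trans
            ((hperm2.cons new).trans (insertSorted_perm new rest).symm)
        have hsort3 : (insertSorted new rest).Pairwise (· ≤ ·) :=
          insertSorted_sorted new (List.pairwise_cons.mp hsort1).2
        have hne3 : insertSorted new rest ≠ [] := by
          intro h
          have hl := (insertSorted_perm new rest).length_eq
          rw [h] at hl; simp at hl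
        have := ih (((xs.erase y).erase y2) ++ [new]) (insertSorted new rest) (answer + 1)
          hperm3 hsort3 hne3
        simp only [solutionLoop, loopB]
        rw [if_pos hcond, if_pos hK]
        simpa [pyHeapPop, htop, htop1, hnew] using this
      · have : ¬ (pyHeapTop xs < K ∧ xs.length > 1) := by omega
        simp only [solutionLoop, loopB]
        rw [if_neg this, if_neg hK]
        exact finish_eq K answer hperm hsort rfl

-- ===== VERDICT (by name: the statement is the Claim_ definition above) =====
theorem solution_spec : Claim_equal_solution := by
  intro scoville K _ hpre
  unfold Spec_solution solution solution_alt
  have hperm : scoville.Perm (PySem.List.sorted scoville (fun x => x) false) :=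
    (PySem.List.sorted_perm scoville (fun x => x) false).symm
  have hsort : (PySem.List.sorted scoville (fun x => x) false).Pairwise (· ≤ ·) := by
    have := PySem.List.sorted_pairwise (xs := scoville) (key := fun x => x)
    simpa using this
  have hne : PySem.List.sorted scoville (fun x => x) false ≠ [] := by
    simpa [PySem.List.sorted_eq_nil_iff] using hpre
  exact loop_agree scoville.length scoville _ K 0 hperm hsort hne
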